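-- pv_equiv track=rewrite | github.com/saurluca/Dungeon-Crawler | maze_generator.py | generate_alternating_grid
-- ===== SOURCE A (Python) =====
-- def generate_alternating_grid(tile_num_x, tile_num_y):
--     grid = [["#" for _ in range(tile_num_y)]]
--     for x in range((tile_num_x - 2) // 2 + 1):
--         flip = True
--         row = []
--         for y in range(tile_num_y):
--             row.append("#") if flip else row.append(".")
--             flip = not flip
--         grid.append(row)
--         grid.append(["#" for _ in range(tile_num_y)])
--     return grid
-- ===== SOURCE B (Python) =====
-- def generate_alternating_grid(tile_num_x, tile_num_y):
--     # Column-major construction: build each COLUMN of the maze (even columns are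
--     # solid walls, odd columns alternate wall/floor), then transpose the columns
--     # into rows with a zip-fold that appends each column's entries to the rows.
--     n = 2 * max((tile_num_x - 2) // 2 + 1, 0) + 1  # total number of rows
--     cols = [["#"] * n if y % 2 == 0
--             else ["#" if x % 2 == 0 else "." for x in range(n)]
--             for y in range(tile_num_y)]
--     rows = [[] for _ in range(n)]
--     for col in cols:
--         for r, v in zip(rows, col):
--             r.append(v)
--     return rows
-- ===== Notes on version B (the rewrite author's own statement) =====
-- stated objective: alternative
-- what changed: Builds the maze column-major (even columns solid wall, odd columns alternating wall/floor) and then transposes the columns into rows with an iterative zip-fold, instead of A's row-major seed-row-plus-paired-append loop with a toggling flip flag.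
import Mathlib
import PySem

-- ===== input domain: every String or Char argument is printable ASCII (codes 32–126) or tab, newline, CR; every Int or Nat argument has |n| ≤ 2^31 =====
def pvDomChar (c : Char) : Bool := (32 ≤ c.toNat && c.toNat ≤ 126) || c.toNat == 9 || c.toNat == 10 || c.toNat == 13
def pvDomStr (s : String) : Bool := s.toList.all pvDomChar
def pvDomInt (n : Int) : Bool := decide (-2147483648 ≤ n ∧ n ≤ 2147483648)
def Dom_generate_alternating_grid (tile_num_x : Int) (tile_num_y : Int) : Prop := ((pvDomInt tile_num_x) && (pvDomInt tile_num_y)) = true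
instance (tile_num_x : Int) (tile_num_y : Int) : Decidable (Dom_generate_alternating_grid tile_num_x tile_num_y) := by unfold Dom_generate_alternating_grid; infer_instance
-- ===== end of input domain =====

-- B builds the maze column-major (even columns all-wall, odd columns alternating) and
-- transposes the columns into rows with an iterative zip-fold, replacing A's row-major
-- seed-plus-paired-append loop with its toggling flip flag (objective: alternative).

-- ===== PORT A =====
def generate_alternating_grid (tile_num_x : Int) (tile_num_y : Int) : List (List String) :=
  -- for x in range((tile_num_x-2)//2 + 1): build row with toggling flip, append it and a '#'-row
  (PySem.List.pyRange 0 (PySem.Int.floordiv (tile_num_x - 2) 2 + 1) 1).foldl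
    (fun grid _x =>
      grid
        ++ [((PySem.List.pyRange 0 tile_num_y 1).foldl
              (fun (rf : List String × Bool) _y =>
                ((if rf.2 then rf.1 ++ ["#"] else rf.1 ++ ["."]), !rf.2))
              ([], true)).1]
        ++ [(PySem.List.pyRange 0 tile_num_y 1).map (fun _ => "#")])
    -- grid = [["#" for _ in range(tile_num_y)]]
    [(PySem.List.pyRange 0 tile_num_y 1).map (fun _ => "#")]

-- ===== PORT B =====
def generate_alternating_grid_alt (tile_num_x : Int) (tile_num_y : Int) : List (List String) :=
  -- n = 2 * max((tile_num_x - 2) // 2 + 1, 0) + 1  (inlined below)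
  -- cols = [["#"]*n if y % 2 == 0 else ["#" if x % 2 == 0 else "." for x in range(n)] for y in range(tile_num_y)]
  -- rows = [[] for _ in range(n)]; for col in cols: rows = [r + [v] for r, v in zip(rows, col)]
  ((PySem.List.pyRange 0 tile_num_y 1).map (fun y =>
    if PySem.Int.mod y 2 = 0 then
      List.replicate (2 * max (PySem.Int.floordiv (tile_num_x - 2) 2 + 1) 0 + 1).toNat "#"
    else (PySem.List.pyRange 0 (2 * max (PySem.Int.floordiv (tile_num_x - 2) 2 + 1) 0 + 1) 1).map
      (fun x => if PySem.Int.mod x 2 = 0 then "#" else "."))).foldl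
    (fun rows col => (rows.zip col).map (fun p => p.1 ++ [p.2]))
    ((PySem.List.pyRange 0 (2 * max (PySem.Int.floordiv (tile_num_x - 2) 2 + 1) 0 + 1) 1).map
      (fun _ => ([] : List String)))

-- ===== PRECONDITION & SPEC =====
def Spec_generate_alternating_grid (tile_num_x : Int) (tile_num_y : Int) (out : List (List String)) : Prop := out = generate_alternating_grid_alt tile_num_x tile_num_y
instance (tile_num_x : Int) (tile_num_y : Int) (out : List (List String)) : Decidable (Spec_generate_alternating_grid tile_num_x tile_num_y out) := by unfold Spec_generate_alternating_grid; infer_instance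

-- ===== CLAIM (what is proved, stated in full; the proofs are below) =====
def Claim_equal_generate_alternating_grid : Prop := ∀ (tile_num_x : Int) (tile_num_y : Int), Dom_generate_alternating_grid tile_num_x tile_num_y → Spec_generate_alternating_grid tile_num_x tile_num_y (generate_alternating_grid tile_num_x tile_num_y)

-- ===== LEMMAS AND PROOFS =====

-- the all-wall row both programs produce at even row indices
def pvHashRow (ty : Int) : List String := (PySem.List.pyRange 0 ty 1).map (fun _ => "#")

-- alternating pattern of given length starting with flag b
def pvPat : Bool → Nat → List String
  | _, 0 => []
  | b, n + 1 => (if b then "#" else ".") :: pvPat (!b) n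

-- the rows A's outer loop appends after the seed row, K iterations
def pvBody (r1 r2 : List String) : Nat → List (List String)
  | 0 => []
  | n + 1 => r1 :: r2 :: pvBody r1 r2 n

theorem pvPat_range : ∀ (L : Nat),
    pvPat true L = (List.range L).map (fun k => if k % 2 = 0 then "#" else ".") ∧
    pvPat false L = (List.range L).map (fun k => if k % 2 = 0 then "." else "#") := by
  intro L
  induction L with
  | zero => simp [pvPat]
  | succ n ih =>
    obtain ⟨h1, h2⟩ := ih
    rw [List.range_succ_eq_map]
    constructor
    · simp only [pvPat, Bool.not_true, h2, List.map_cons, List.map_map, List.cons.injEq]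
      refine ⟨by trivial, List.map_congr_left ?_⟩
      intro a _
      simp only [Function.comp_apply]
      rcases Nat.even_or_odd a with h | h <;> rcases h with ⟨c, hc⟩ <;> subst hc <;>
        · split_ifs <;> first | rfl | omega
    · simp only [pvPat, Bool.not_false, h1, List.map_cons, List.map_map, List.cons.injEq]
      refine ⟨by trivial, List.map_congr_left ?_⟩
      intro a _
      simp only [Function.comp_apply]
      rcases Nat.even_or_odd a with h | h <;> rcases h with ⟨c, hc⟩ <;> subst hc <;>
        · split_ifs <;> first | rfl | omega

theorem pvInner_foldl (l : List Int) : ∀ (row : List String) (b : Bool),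
    l.foldl (fun (rf : List String × Bool) _y =>
      ((if rf.2 then rf.1 ++ ["#"] else rf.1 ++ ["."]), !rf.2)) (row, b)
    = (row ++ pvPat b l.length, if l.length % 2 = 0 then b else !b) := by
  induction l with
  | nil => simp [pvPat]
  | cons a l ih =>
    intro row b
    simp only [List.foldl_cons, List.length_cons]
    rw [ih]
    cases b <;>
      · simp only [pvPat, Bool.not_true, Bool.not_false, if_true, Prod.mk.injEq]
        constructor
        · simp
        · split_ifs <;> first | rfl | omega

theorem pvBody_succ_right (r1 r2 : List String) (n : Nat) :
    pvBody r1 r2 (n + 1) = pvBody r1 r2 n ++ [r1, r2] := by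
  induction n with
  | zero => rfl
  | succ k ih =>
    calc pvBody r1 r2 (k + 1 + 1) = r1 :: r2 :: pvBody r1 r2 (k + 1) := rfl
    _ = r1 :: r2 :: (pvBody r1 r2 k ++ [r1, r2]) := by rw [ih]
    _ = pvBody r1 r2 (k + 1) ++ [r1, r2] := rfl

theorem pvFold_const (r1 r2 : List String) (l : List Int) :
    ∀ g : List (List String),
      l.foldl (fun g _ => g ++ [r1] ++ [r2]) g = g ++ pvBody r1 r2 l.length := by
  induction l with
  | nil => intro g; simp [pvBody]
  | cons a l ih =>
    intro g
    simp only [List.foldl_cons, List.length_cons]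
    rw [ih]
    simp [pvBody]

theorem pvRangeMap (r1 r2 : List String) (K : Nat) :
    (List.range (1 + 2*K)).map (fun k => if k % 2 = 0 then r1 else r2)
    = r1 :: pvBody r2 r1 K := by
  induction K with
  | zero => simp [pvBody]
  | succ K ih =>
    have h : 1 + 2*(K+1) = ((1 + 2*K) + 1) + 1 := by omega
    rw [h, List.range_succ, List.range_succ, List.map_append, List.map_append, ih,
        pvBody_succ_right]
    have h2 : ((1 + 2*K) + 1) % 2 = 0 := by omega
    simp [h2]

theorem pvMod_cast (k : Nat) : PySem.Int.mod ((k : Int)) 2 = ((k % 2 : Nat) : Int) := by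
  exact_mod_cast PySem.Int.mod_natCast k 2

theorem pvPath_eq (ty : Int) :
    (PySem.List.pyRange 0 ty 1).map (fun y => if PySem.Int.mod y 2 = 0 then "#" else ".")
    = pvPat true ty.toNat := by
  rw [PySem.List.pyRange_one, List.map_map, (pvPat_range ty.toNat).1]
  have hlen : (ty - 0).toNat = ty.toNat := by omega
  rw [hlen]
  apply List.map_congr_left
  intro k _
  simp only [Function.comp_apply, zero_add, pvMod_cast]
  by_cases h : k % 2 = 0 <;> simp [h]
  omega

-- one transpose step: zipping an indexed row list with a column of length n appends
-- the column's entry at each index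
theorem pvZip_step (n : Nat) (g : Nat → List String) (c : List String) (hc : c.length = n) :
    (((List.range n).map g).zip c).map (fun p => p.1 ++ [p.2])
    = (List.range n).map (fun x => g x ++ [c.getD x ""]) := by
  apply List.ext_getElem
  · simp [hc]
  · intro i h1 h2
    have hi : i < n := by simpa using h2
    have hic : i < c.length := by omega
    simp [List.getElem_zip, List.getD_eq_getElem?_getD, List.getElem?_eq_getElem hic]

-- the whole transpose fold: row x collects entry x of each column
theorem pvFold_transpose (n : Nat) (cols : List (List String))
    (hc : ∀ c ∈ cols, c.length = n) : ∀ g : Nat → List String,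
    cols.foldl (fun rows col => (rows.zip col).map (fun p => p.1 ++ [p.2]))
        ((List.range n).map g)
    = (List.range n).map (fun x => g x ++ cols.map (fun c => c.getD x "")) := by
  induction cols with
  | nil => intro g; simp
  | cons c cs ih =>
    intro g
    simp only [List.foldl_cons]
    rw [pvZip_step n g c (hc c (by simp))]
    rw [ih (fun d hd => hc d (by simp [hd]))]
    simp [List.append_assoc]

-- ===== VERDICT (by name: the statement is the Claim_ definition above) =====
theorem generate_alternating_grid_spec : Claim_equal_generate_alternating_grid := by
  intro tx ty _
  unfold Spec_generate_alternating_grid generate_alternating_grid generate_alternating_grid_alt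
  set m : Int := PySem.Int.floordiv (tx - 2) 2 + 1 with hm
  set n : Int := 2 * max m 0 + 1 with hn
  set K : Nat := m.toNat with hK
  have hnK : n.toNat = 1 + 2 * K := by
    by_cases h : m ≤ 0
    · rw [hn, max_eq_right h]; omega
    · rw [hn, max_eq_left (show (0 : Int) ≤ m by omega)]; omega
  -- ===== A side =====
  have hrow : ((PySem.List.pyRange 0 ty 1).foldl
      (fun (rf : List String × Bool) _y =>
        ((if rf.2 then rf.1 ++ ["#"] else rf.1 ++ ["."]), !rf.2)) ([], true)).1
      = pvPat true ty.toNat := by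
    rw [pvInner_foldl]
    simp only [PySem.List.length_pyRange_one]
    have : (ty - 0).toNat = ty.toNat := by omega
    rw [this]
    simp
  have hfun : (fun (grid : List (List String)) (_x : Int) =>
      grid
        ++ [((PySem.List.pyRange 0 ty 1).foldl
              (fun (rf : List String × Bool) _y =>
                ((if rf.2 then rf.1 ++ ["#"] else rf.1 ++ ["."]), !rf.2))
              ([], true)).1]
        ++ [(PySem.List.pyRange 0 ty 1).map (fun _ => "#")])
      = fun grid _x => grid ++ [pvPat true ty.toNat] ++ [pvHashRow ty] := by
    funext g x
    rw [hrow]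
    rfl
  rw [hfun, pvFold_const]
  have hlenm : (PySem.List.pyRange 0 m 1).length = K := by
    rw [PySem.List.length_pyRange_one]; omega
  rw [hlenm]
  -- ===== B side =====
  rw [show (PySem.List.pyRange 0 n 1).map (fun _ => ([] : List String))
      = (List.range n.toNat).map (fun _ => ([] : List String)) by
    rw [PySem.List.pyRange_one, List.map_map]
    congr 1
    rw [sub_zero]]
  rw [pvFold_transpose n.toNat]
  · -- identify each transposed row
    have hrows : ∀ x ∈ List.range n.toNat,
        ([] : List String) ++ ((PySem.List.pyRange 0 ty 1).map (fun y =>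
          if PySem.Int.mod y 2 = 0 then List.replicate n.toNat "#"
          else (PySem.List.pyRange 0 n 1).map
            (fun xi => if PySem.Int.mod xi 2 = 0 then "#" else "."))).map
          (fun c => c.getD x "")
        = (if x % 2 = 0 then pvHashRow ty else pvPat true ty.toNat) := by
      intro x hx
      have hxn : x < n.toNat := by simpa using hx
      rw [List.nil_append, List.map_map]
      have hcell : ∀ y : Int,
          ((fun c : List String => c.getD x "") ∘ (fun y =>
            if PySem.Int.mod y 2 = 0 then List.replicate n.toNat "#"
            else (PySem.List.pyRange 0 n 1).map
              (fun xi => if PySem.Int.mod xi 2 = 0 then "#" else "."))) y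
          = (if PySem.Int.mod y 2 = 0 then "#"
             else if x % 2 = 0 then "#" else ".") := by
        intro y
        simp only [Function.comp_apply]
        by_cases hy : PySem.Int.mod y 2 = 0
        · rw [if_pos hy, if_pos hy, List.getD_eq_getElem _ "" (by simpa using hxn)]
          simp
        · rw [if_neg hy, if_neg hy]
          rw [PySem.List.pyRange_one, List.map_map]
          have hxlen : x < ((n - 0).toNat) := by omega
          rw [List.getD_eq_getElem _ "" (by simpa using hxlen)]
          simp only [List.getElem_map, List.getElem_range, Function.comp_apply, zero_add,
            pvMod_cast]
          by_cases h : x % 2 = 0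
          · rw [if_pos (by exact_mod_cast congrArg (Nat.cast : Nat → Int) h), if_pos h]
          · rw [if_neg (by omega), if_neg h]
      rw [List.map_congr_left (fun y _ => hcell y)]
      by_cases h : x % 2 = 0
      · simp only [h, if_true, ite_self]
        rfl
      · simp only [h, if_false]
        exact pvPath_eq ty
    rw [List.map_congr_left hrows, hnK, pvRangeMap]
    rfl
  · -- every column has length n.toNat
    intro c hc
    simp only [List.mem_map] at hc
    obtain ⟨y, _, rfl⟩ := hc
    by_cases hy : PySem.Int.mod y 2 = 0
    · rw [if_pos hy]; simp
    · simp only [hy, if_false]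
      rw [PySem.List.pyRange_one]
      simp only [List.length_map, List.length_range]
      omega
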